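-- pv_equiv track=rewrite | github.com/jerry826/auto_hangman | model3.py | guess_tree
-- ===== SOURCE A (Python) =====
-- import collections
--
-- def guess_tree(word_set,k=4):
-- 	'''
-- 	Build a guess decision tree
-- 	:param word_set: word set
-- 	:param k: layer
-- 	:return:
-- 	'''
-- 	word_set_list = [[]] * (2 ** k - 1)
-- 	guess_his_list = [''] * (2 ** k - 1)
-- 	guess_list = [''] * (2 ** (k - 1) - 1)
--
-- 	guess_his_list[0] = ''
-- 	word_set_list[0] = word_set  # [word for word in word_set if set1[0] in word]
-- 	for i in range(0, k - 1):
-- 		for j in range(2 ** i - 1, 2 ** (i + 1) - 1):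
-- 			set_x = word_set_list[j]
-- 			guess_hist = guess_his_list[j]
-- 			if len(set_x)>0:
-- 				ch_counter = collections.Counter([x for x in ''.join(set_x)]).most_common(k)
-- 				l = 0
-- 				while len(ch_counter)>l and ch_counter[l][0] in guess_hist:
-- 					l += 1
-- 				if l<len(ch_counter):
-- 					w1 = ch_counter[l][0]
-- 					guess_list[j] = w1
-- 					word_set_list[2 * j + 1] = [word for word in set_x if w1 in word]
-- 					word_set_list[2 * j + 2] = [word for word in set_x if w1 not in word]
--
-- 					guess_his_list[2 * j + 1] = guess_his_list[j] + w1
-- 					guess_his_list[2 * j + 2] = guess_his_list[j] + w1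
--
-- 	return guess_list
-- ===== SOURCE B (Python) =====
-- import collections
--
--
-- def _build(j, set_x, hist, level, guess_list, k):
--     """Depth-first: pick the most common not-yet-guessed char of this node's
--     word set, record it at heap index j, split and recurse into 2j+1 / 2j+2."""
--     if not set_x:
--         return
--     w1 = ''
--     for ch, _ in collections.Counter(''.join(set_x)).most_common(k):
--         if ch not in hist:
--             w1 = ch
--             break
--     if not w1:
--         return
--     guess_list[j] = w1
--     if level + 1 <= k - 2:
--         _build(2 * j + 1, [w for w in set_x if w1 in w], hist + w1,
--                level + 1, guess_list, k)
--         _build(2 * j + 2, [w for w in set_x if w1 not in w], hist + w1,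
--                level + 1, guess_list, k)
--
--
-- def guess_tree(word_set, k=4):
--     guess_list = [''] * (2 ** (k - 1) - 1)
--     if k >= 2:
--         _build(0, word_set, '', 0, guess_list, k)
--     return guess_list
-- ===== Notes on version B (the rewrite author's own statement) =====
-- stated objective: alternative
-- what changed: Replaces the three preallocated index arrays (word sets, histories, guesses) and the level-order double loop over node indices with a recursive depth-first _build(j, set_x, hist, level) that carries each node's word set and history as arguments and writes its guess directly into the guess list at heap index j before recursing into children 2j+1/2j+2; Pre_ excludes only the inputs where A raises: k <= 0 (TypeError, 2**(k-1) is a float) and k >= 64 (OverflowError: the list-repetition count 2**k - 1 exceeds an index-sized integer).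
import Mathlib
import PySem

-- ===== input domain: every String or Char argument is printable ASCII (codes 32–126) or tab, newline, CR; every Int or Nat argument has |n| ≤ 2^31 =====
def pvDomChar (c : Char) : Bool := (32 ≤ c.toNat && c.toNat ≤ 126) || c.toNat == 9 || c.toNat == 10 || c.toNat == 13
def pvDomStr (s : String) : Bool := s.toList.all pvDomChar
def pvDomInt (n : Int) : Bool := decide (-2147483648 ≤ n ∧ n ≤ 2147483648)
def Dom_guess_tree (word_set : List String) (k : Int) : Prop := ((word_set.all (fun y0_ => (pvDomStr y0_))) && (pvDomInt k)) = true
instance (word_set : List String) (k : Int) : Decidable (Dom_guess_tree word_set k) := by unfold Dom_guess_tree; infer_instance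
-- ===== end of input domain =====

-- B replaces A's three preallocated index arrays and level-order double loop by a recursive
-- depth-first build that writes each node's guess directly into the guess list
-- (objective: alternative decomposition, same cost; return-value equivalence on k >= 1).


-- ===== PORT A =====
-- collections.Counter(list(''.join(set_x))).most_common(n): Counter counts with first-occurrence
-- order (PySem.Dict.counter); most_common(n) = the stable descending sort by count, first n
-- (here n = k ≥ 1 at every call, so .toNat is exact).
def pvMostCommon (chars : List Char) (n : Int) : List (Char × Int) :=
  (PySem.List.sorted (PySem.Dict.counter chars).items (fun p => p.2) true).take n.toNat

-- l = 0; while len(ch_counter) > l and ch_counter[l][0] in guess_hist: l += 1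
def pvSkip (cnt : List (Char × Int)) (hist : List Char) (l : Nat) : Nat :=
  if h : l < cnt.length then
    if PySem.Chars.isIn [(cnt[l]'h).1] hist then pvSkip cnt hist (l + 1) else l
  else l
termination_by cnt.length - l

-- the body of A's inner loop over node indices j (histories kept as List Char; 'w1 in word'
-- is PySem.Chars.isIn with the one-char string [w1], exact)
def pvBodyA (k : Int) (st : List (List String) × List (List Char) × List String) (j : Int) :
    List (List String) × List (List Char) × List String :=
  let wsl := st.1
  let ghl := st.2.1
  let gl := st.2.2
  let jn := j.toNat                                    -- j ≥ 0 for every j the ranges produce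
  let set_x := wsl.getD jn []                          -- index always in range (node of level < k-1)
  let guess_hist := ghl.getD jn []
  if set_x.length > 0 then
    let ch_counter := pvMostCommon (set_x.flatMap String.toList) k
    let l := pvSkip ch_counter guess_hist 0
    if hl : l < ch_counter.length then
      let w1 := (ch_counter[l]'hl).1
      ((wsl.set (2 * jn + 1) (set_x.filter (fun w => PySem.Chars.isIn [w1] w.toList))).set
          (2 * jn + 2) (set_x.filter (fun w => !PySem.Chars.isIn [w1] w.toList)),
       (ghl.set (2 * jn + 1) (guess_hist ++ [w1])).set (2 * jn + 2) (guess_hist ++ [w1]),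
       gl.set jn (String.ofList [w1]))
    else st
  else st

def guess_tree (word_set : List String) (k : Int) : List String :=
  -- Pre_ gives 1 ≤ k (Python raises for k ≤ 0), so k.toNat is exact below
  let K := k.toNat
  let word_set_list := (List.replicate (2 ^ K - 1) ([] : List String)).set 0 word_set
  let guess_his_list := (List.replicate (2 ^ K - 1) ([] : List Char)).set 0 []
  let guess_list := List.replicate (2 ^ (K - 1) - 1) ""
  let st :=
    (PySem.List.pyRange 0 (k - 1) 1).foldl (fun st i =>
        (PySem.List.pyRange ((2 : Int) ^ i.toNat - 1) ((2 : Int) ^ (i.toNat + 1) - 1) 1).foldl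
          (pvBodyA k) st)
      (word_set_list, guess_his_list, guess_list)
  st.2.2

-- ===== PORT B =====
-- for ch,_ in most_common(k): if ch not in hist: w1 = ch; break   ('' not found = none)
def pvFirstUsable : List (Char × Int) → List Char → Option Char
  | [], _ => none
  | (c, _) :: rest, hist =>
      if PySem.Chars.isIn [c] hist then pvFirstUsable rest hist else some c

-- _build(j, set_x, hist, level, guess_list, k) of Source B: depth-first recursion writing the
-- node's guess at heap index j, then recursing into children 2j+1 / 2j+2 while internal
def pvBuildB (k : Int) (j : Nat) (set_x : List String) (hist : List Char) (level : Int)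
    (gl : List String) : List String :=
  if set_x.isEmpty then gl
  else
    match pvFirstUsable (pvMostCommon (set_x.flatMap String.toList) k) hist with
    | none => gl
    | some w1 =>
      let gl1 := gl.set j (String.ofList [w1])
      if h : level + 1 ≤ k - 2 then
        pvBuildB k (2 * j + 2) (set_x.filter (fun w => !PySem.Chars.isIn [w1] w.toList))
          (hist ++ [w1]) (level + 1)
          (pvBuildB k (2 * j + 1) (set_x.filter (fun w => PySem.Chars.isIn [w1] w.toList))
            (hist ++ [w1]) (level + 1) gl1)
      else gl1
termination_by (k - 1 - level).toNat
decreasing_by all_goals omega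

def guess_tree_alt (word_set : List String) (k : Int) : List String :=
  -- guess_list = ['']*(2**(k-1)-1); if k >= 2: _build(0, word_set, '', 0, guess_list, k)
  let guess_list := List.replicate (2 ^ (k - 1).toNat - 1) ""
  if 2 ≤ k then pvBuildB k 0 word_set [] 0 guess_list else guess_list

-- ===== PRECONDITION & SPEC =====
-- Pre_ excludes exactly the inputs on which Python A raises: k ≤ 0 (TypeError: 2**(k-1)
-- is a float there, and a list cannot be multiplied by a float) and k ≥ 64, where the
-- list-repetition count 2**k - 1 exceeds an index-sized integer and A raises OverflowError.
def Pre_guess_tree (word_set : List String) (k : Int) : Prop := 1 ≤ k ∧ k ≤ 63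
instance (word_set : List String) (k : Int) : Decidable (Pre_guess_tree word_set k) := by
  unfold Pre_guess_tree; infer_instance

def pvWitness_guess_tree : List String × Int := (["cat", "dog", "cow"], 3)

def Spec_guess_tree (word_set : List String) (k : Int) (out : List String) : Prop := out = guess_tree_alt word_set k
instance (word_set : List String) (k : Int) (out : List String) : Decidable (Spec_guess_tree word_set k out) := by unfold Spec_guess_tree; infer_instance

-- ===== CLAIM (what is proved, stated in full; the proofs are below) =====
def Claim_equal_guess_tree : Prop := ∀ (word_set : List String) (k : Int), Dom_guess_tree word_set k → Pre_guess_tree word_set k → Spec_guess_tree word_set k (guess_tree word_set k)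

-- ===== LEMMAS AND PROOFS =====

-- proof-side node abstraction: a node is its word set + its guess history
abbrev pvNode : Type := List String × List Char

-- the split A performs at a node, as a pure function (guess, left child, right child)
def pvSplitNode (k : Int) (set_x : List String) (hist : List Char) :
    String × (List String × List Char) × (List String × List Char) :=
  let w1? := if set_x.isEmpty then none
             else pvFirstUsable (pvMostCommon (set_x.flatMap String.toList) k) hist
  match w1? with
  | none => ("", ([], []), ([], []))
  | some w1 =>
      (String.ofList [w1],
       (set_x.filter (fun w => PySem.Chars.isIn [w1] w.toList), hist ++ [w1]),
       (set_x.filter (fun w => !PySem.Chars.isIn [w1] w.toList), hist ++ [w1]))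

def pvOut1 (k : Int) (nd : pvNode) : String := (pvSplitNode k nd.1 nd.2).1
def pvChild (k : Int) (b : Bool) (nd : pvNode) : pvNode :=
  if b then (pvSplitNode k nd.1 nd.2).2.2 else (pvSplitNode k nd.1 nd.2).2.1
def pvChl (k : Int) (nd : pvNode) : List pvNode :=
  [(pvSplitNode k nd.1 nd.2).2.1, (pvSplitNode k nd.1 nd.2).2.2]
def pvNext (k : Int) (fr : List pvNode) : List pvNode := fr.flatMap (pvChl k)

-- outputs of n more levels starting from frontier fr, in level order
def pvAllOuts (k : Int) : Nat → List pvNode → List String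
  | 0, _ => []
  | n + 1, fr => fr.map (pvOut1 k) ++ pvAllOuts k n (pvNext k fr)

-- descend from a node along a list of directions (false = left, true = right)
def pvDescend (k : Int) : pvNode → List Bool → pvNode
  | nd, [] => nd
  | nd, b :: bs => pvDescend k (pvChild k b nd) bs

-- heap index reached from index j along a direction list
def pvIdx (j : Nat) : List Bool → Nat
  | [] => j
  | b :: bs => pvIdx (2 * j + 1 + (if b then 1 else 0)) bs

-- numeric value of a direction list (most significant first)
def pvVal : List Bool → Nat
  | [] => 0
  | b :: bs => (if b then 1 else 0) * 2 ^ bs.length + pvVal bs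

-- the d-digit direction list of value v (most significant first)
def pvBits : Nat → Nat → List Bool
  | 0, _ => []
  | d + 1, v => pvBits d (v / 2) ++ [v % 2 == 1]

-- m is a heap index in the subtree rooted at j, at relative depth ≤ D
def pvInSub (j D m : Nat) : Prop := ∃ d, d ≤ D ∧ ∃ v, v < 2 ^ d ∧ m + 1 = (j + 1) * 2 ^ d + v

theorem pvGetD_set_self {α : Type} (xs : List α) (n : Nat) (v d : α) (h : n < xs.length) :
    (xs.set n v).getD n d = v := by simp [List.getD, h]

theorem pvGetD_set_ne {α : Type} (xs : List α) (n m : Nat) (v d : α) (h : n ≠ m) :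
    (xs.set n v).getD m d = xs.getD m d := by simp [List.getD, List.getElem?_set, h]

-- set to current value is identity
theorem pvSet_getD_self {α : Type} (xs : List α) (n : Nat) (d : α) (h : n < xs.length)
    (v : α) (hv : xs.getD n d = v) : xs.set n v = xs := by
  subst hv; simp [List.getD, List.getElem?_eq_getElem h, List.set_getElem_self]

-- length of flatMap of pvChl
theorem pvNext_length (k : Int) (fr : List pvNode) : (pvNext k fr).length = 2 * fr.length := by
  induction fr with
  | nil => simp [pvNext]
  | cons nd t ih => simp_all [pvNext, pvChl]; omega

theorem pvFirstUsable_cons (p : Char × Int) (rest : List (Char × Int)) (hist : List Char) :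
    pvFirstUsable (p :: rest) hist =
      if PySem.Chars.isIn [p.1] hist then pvFirstUsable rest hist else some p.1 := by
  obtain ⟨c, m⟩ := p; rfl

theorem pvFirstUsable_eq_skip (cnt : List (Char × Int)) (hist : List Char) (l : Nat) :
    pvFirstUsable (cnt.drop l) hist =
      if h : pvSkip cnt hist l < cnt.length then some ((cnt[pvSkip cnt hist l]'h).1) else none := by
  induction l using pvSkip.induct (cnt := cnt) (hist := hist) with
  | case1 l h hin ih =>
      rw [List.drop_eq_getElem_cons h, pvSkip]
      rw [dif_pos h, if_pos hin, pvFirstUsable_cons, if_pos hin, ih]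
  | case2 l h hin =>
      rw [List.drop_eq_getElem_cons h, pvSkip]
      rw [dif_pos h, if_neg hin, pvFirstUsable_cons, if_neg hin, dif_pos h]
  | case3 l h =>
      rw [List.drop_eq_nil_of_le (by omega), pvSkip, dif_neg h]
      simp [pvFirstUsable, h]

theorem pvBodyA_eq (k : Int) (wsl : List (List String)) (ghl : List (List Char)) (gl : List String)
    (j : Int) (jn : Nat) (hj : j.toNat = jn) (nd : pvNode)
    (hx : wsl.getD jn [] = nd.1) (hh : ghl.getD jn [] = nd.2)
    (hw : 2 * jn + 2 < wsl.length) (hg : 2 * jn + 2 < ghl.length) (hgll : jn < gl.length)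
    (hd1 : wsl.getD (2 * jn + 1) [] = []) (hd2 : wsl.getD (2 * jn + 2) [] = [])
    (hd3 : ghl.getD (2 * jn + 1) [] = []) (hd4 : ghl.getD (2 * jn + 2) [] = [])
    (hge : gl.getD jn "" = "") :
    pvBodyA k (wsl, ghl, gl) j =
      ((wsl.set (2 * jn + 1) (pvSplitNode k nd.1 nd.2).2.1.1).set (2 * jn + 2) (pvSplitNode k nd.1 nd.2).2.2.1,
       (ghl.set (2 * jn + 1) (pvSplitNode k nd.1 nd.2).2.1.2).set (2 * jn + 2) (pvSplitNode k nd.1 nd.2).2.2.2,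
       gl.set jn (pvSplitNode k nd.1 nd.2).1) := by
  have hnoop : ∀ (r : String × (List String × List Char) × (List String × List Char)),
      r = ("", ([], []), ([], [])) →
      ((wsl.set (2 * jn + 1) r.2.1.1).set (2 * jn + 2) r.2.2.1,
       (ghl.set (2 * jn + 1) r.2.1.2).set (2 * jn + 2) r.2.2.2,
       gl.set jn r.1) = (wsl, ghl, gl) := by
    rintro r rfl
    rw [pvSet_getD_self wsl _ _ (by omega) _ hd1, pvSet_getD_self wsl _ _ (by omega) _ hd2,
        pvSet_getD_self ghl _ _ (by omega) _ hd3, pvSet_getD_self ghl _ _ (by omega) _ hd4,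
        pvSet_getD_self gl _ _ hgll _ hge]
  simp only [pvBodyA, hj, hx, hh]
  by_cases he : nd.1 = []
  · rw [hnoop _ (by simp [pvSplitNode, he])]
    simp [he]
  · have hlen : 0 < nd.1.length := List.length_pos_of_ne_nil he
    have hie : nd.1.isEmpty = false := by simp [he]
    rw [if_pos hlen]
    have hfu := pvFirstUsable_eq_skip (pvMostCommon (nd.1.flatMap String.toList) k) nd.2 0
    rw [List.drop_zero] at hfu
    by_cases hl : pvSkip (pvMostCommon (nd.1.flatMap String.toList) k) nd.2 0 <
        (pvMostCommon (nd.1.flatMap String.toList) k).length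
    · rw [dif_pos hl] at hfu
      have hs : pvSplitNode k nd.1 nd.2 =
          (String.ofList [((pvMostCommon (nd.1.flatMap String.toList) k)[pvSkip (pvMostCommon (nd.1.flatMap String.toList) k) nd.2 0]'hl).1],
           (nd.1.filter (fun w => PySem.Chars.isIn [((pvMostCommon (nd.1.flatMap String.toList) k)[pvSkip (pvMostCommon (nd.1.flatMap String.toList) k) nd.2 0]'hl).1] w.toList), nd.2 ++ [((pvMostCommon (nd.1.flatMap String.toList) k)[pvSkip (pvMostCommon (nd.1.flatMap String.toList) k) nd.2 0]'hl).1]),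
           (nd.1.filter (fun w => !PySem.Chars.isIn [((pvMostCommon (nd.1.flatMap String.toList) k)[pvSkip (pvMostCommon (nd.1.flatMap String.toList) k) nd.2 0]'hl).1] w.toList), nd.2 ++ [((pvMostCommon (nd.1.flatMap String.toList) k)[pvSkip (pvMostCommon (nd.1.flatMap String.toList) k) nd.2 0]'hl).1])) := by
        simp only [pvSplitNode, hie, Bool.false_eq_true, if_false, hfu]
      rw [dif_pos hl, hs]
    · rw [dif_neg hl] at hfu
      rw [dif_neg hl, hnoop _ (by simp only [pvSplitNode, hie, Bool.false_eq_true, if_false, hfu])]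

theorem pvGetD_replicate {α : Type} (n m : Nat) (d : α) : (List.replicate n d).getD m d = d := by
  simp [List.getD, List.getElem?_replicate]; split <;> simp

theorem pvSet_mid {α : Type} (out : List α) (n : Nat) (hn : 0 < n) (d v : α) :
    (out ++ List.replicate n d).set out.length v = (out ++ [v]) ++ List.replicate (n - 1) d := by
  obtain ⟨m, rfl⟩ : ∃ m, n = m + 1 := ⟨n - 1, by omega⟩
  have : (out ++ List.replicate (m+1) d).set (out.length + 0) v = out ++ (List.replicate (m+1) d).set 0 v := by
    simp [List.set_append]
  simpa [List.replicate_succ] using this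

theorem pvFoldA_level (k : Int) (K i : Nat) (hiK : i + 2 ≤ K)
    (fs : List pvNode) (pos : Nat) (hpos : pos + fs.length = 2 ^ i)
    (wsl : List (List String)) (ghl : List (List Char)) (gl : List String)
    (acc : List pvNode) (out : List String)
    (hl1 : wsl.length = 2 ^ K - 1) (hl2 : ghl.length = 2 ^ K - 1) (hl3 : gl.length = 2 ^ (K-1) - 1)
    (hacc : acc.length = 2 * pos)
    (hfr : ∀ q, q < fs.length → wsl.getD (2 ^ i - 1 + pos + q) [] = (fs.getD q ([], [])).1
        ∧ ghl.getD (2 ^ i - 1 + pos + q) [] = (fs.getD q ([], [])).2)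
    (hch : ∀ r, r < 2 * pos → wsl.getD (2 ^ (i+1) - 1 + r) [] = (acc.getD r ([], [])).1
        ∧ ghl.getD (2 ^ (i+1) - 1 + r) [] = (acc.getD r ([], [])).2)
    (hdef : ∀ m, 2 ^ (i+1) - 1 + 2 * pos ≤ m → wsl.getD m [] = [] ∧ ghl.getD m [] = [])
    (hgl : gl = out ++ List.replicate (2 ^ (K-1) - 1 - out.length) "")
    (hout : out.length = 2 ^ i - 1 + pos) :
    ∃ wsl' ghl',
      (PySem.List.pyRange ((2 ^ i - 1 + pos : Nat) : Int) ((2 ^ (i+1) - 1 : Nat) : Int) 1).foldl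
          (pvBodyA k) (wsl, ghl, gl)
        = (wsl', ghl', (out ++ fs.map (pvOut1 k)) ++ List.replicate (2 ^ (K-1) - 1 - (out.length + fs.length)) "")
      ∧ wsl'.length = 2 ^ K - 1 ∧ ghl'.length = 2 ^ K - 1
      ∧ (∀ q, q < 2 * pos + 2 * fs.length →
            wsl'.getD (2 ^ (i+1) - 1 + q) [] = ((acc ++ fs.flatMap (pvChl k)).getD q ([], [])).1
          ∧ ghl'.getD (2 ^ (i+1) - 1 + q) [] = ((acc ++ fs.flatMap (pvChl k)).getD q ([], [])).2)
      ∧ (∀ m, 2 ^ (i+1) - 1 + 2 * pos + 2 * fs.length ≤ m → wsl'.getD m [] = [] ∧ ghl'.getD m [] = []) := by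
  have pow1 : (2:Nat)^(i+1) = 2 * 2^i := by rw [pow_succ]; ring
  have pow2 : (2:Nat)^(i+2) ≤ 2^K := Nat.pow_le_pow_right (by norm_num) hiK
  have pow3 : (2:Nat)^(i+2) = 4 * 2^i := by rw [pow_succ, pow_succ]; ring
  have pow4 : (2:Nat)^K = 2 * 2^(K-1) := by
    have : K - 1 + 1 = K := by omega
    calc (2:Nat)^K = 2^(K-1+1) := by rw [this]
    _ = 2 * 2^(K-1) := by rw [pow_succ]; ring
  have pow5 : (1:Nat) ≤ 2^i := Nat.one_le_two_pow
  have pow6 : (2:Nat)^(i+1) ≤ 2^(K-1) := Nat.pow_le_pow_right (by norm_num) (by omega)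
  induction fs generalizing pos wsl ghl gl acc out with
  | nil =>
      have hp0 : pos = 2 ^ i := by simpa using hpos
      rw [PySem.List.pyRange_one_eq_nil
        (by exact_mod_cast (by omega : (2:Nat)^(i+1) - 1 ≤ 2^i - 1 + pos))]
      exact ⟨wsl, ghl, by simpa using hgl, hl1, hl2,
        by simpa using fun q hq => hch q (by omega),
        by simpa using fun m hm => hdef m (by omega)⟩
  | cons nd fs' ih =>
      have hplt : pos < 2^i := by have h := hpos; simp at h; omega
      rw [PySem.List.pyRange_one_cons (by exact_mod_cast (by omega : 2^i - 1 + pos < 2^(i+1) - 1)),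
        List.foldl_cons]
      rw [pvBodyA_eq k wsl ghl gl _ (2^i - 1 + pos) (Int.toNat_natCast _) nd
        (by simpa using (hfr 0 (by simp)).1) (by simpa using (hfr 0 (by simp)).2)
        (by omega) (by omega) (by omega)
        (hdef _ (by omega)).1 (hdef _ (by omega)).1 (hdef _ (by omega)).2 (hdef _ (by omega)).2
        (by rw [hgl, ← hout, List.getD_append_right _ _ _ _ (le_refl _)]
            simpa using pvGetD_replicate _ 0 "")]
      have hlen' : pos + 1 + fs'.length = 2 ^ i := by simp at hpos; omega
      have hcast : ((2 ^ i - 1 + pos : Nat) : Int) + 1 = ((2 ^ i - 1 + (pos + 1) : Nat) : Int) := by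
        push_cast; ring
      rw [hcast]
      obtain ⟨wsl', ghl', hmain, hq1, hq2, hchl, hdf⟩ :=
        ih (pos + 1) (by omega)
          ((wsl.set (2 * (2 ^ i - 1 + pos) + 1) (pvSplitNode k nd.1 nd.2).2.1.1).set
            (2 * (2 ^ i - 1 + pos) + 2) (pvSplitNode k nd.1 nd.2).2.2.1)
          ((ghl.set (2 * (2 ^ i - 1 + pos) + 1) (pvSplitNode k nd.1 nd.2).2.1.2).set
            (2 * (2 ^ i - 1 + pos) + 2) (pvSplitNode k nd.1 nd.2).2.2.2)
          (gl.set (2 ^ i - 1 + pos) (pvSplitNode k nd.1 nd.2).1)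
          (acc ++ pvChl k nd) (out ++ [(pvSplitNode k nd.1 nd.2).1])
          (by simp [hl1]) (by simp [hl2]) (by simp [hl3])
          (by simp [pvChl, hacc]; omega)
          (by -- frontier suffix untouched by the two child writes
            intro q hq
            have e : 2 ^ i - 1 + (pos + 1) + q = 2 ^ i - 1 + pos + (q + 1) := by omega
            constructor
            · rw [pvGetD_set_ne _ _ _ _ _ (by omega), pvGetD_set_ne _ _ _ _ _ (by omega), e]
              have h := (hfr (q + 1) (by simp; omega)).1
              simpa using h
            · rw [pvGetD_set_ne _ _ _ _ _ (by omega), pvGetD_set_ne _ _ _ _ _ (by omega), e]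
              have h := (hfr (q + 1) (by simp; omega)).2
              simpa using h)
          (by -- accumulated children, plus the two fresh ones
            intro r hr
            rcases Nat.lt_or_ge r (2 * pos) with h | h
            · have e1 := hch r h
              rw [List.getD_append _ _ _ _ (by omega)]
              exact ⟨by rw [pvGetD_set_ne _ _ _ _ _ (by omega), pvGetD_set_ne _ _ _ _ _ (by omega)]; exact e1.1,
                     by rw [pvGetD_set_ne _ _ _ _ _ (by omega), pvGetD_set_ne _ _ _ _ _ (by omega)]; exact e1.2⟩
            · rw [List.getD_append_right _ _ _ _ (by omega)]
              rcases (by omega : r = 2 * pos ∨ r = 2 * pos + 1) with rfl | rfl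
              · have e : 2 ^ (i+1) - 1 + 2 * pos = 2 * (2 ^ i - 1 + pos) + 1 := by omega
                rw [e]
                have e2 : 2 * pos - acc.length = 0 := by omega
                rw [e2]
                exact ⟨by rw [pvGetD_set_ne _ _ _ _ _ (by omega),
                          pvGetD_set_self _ _ _ _ (by omega)]; simp [pvChl],
                       by rw [pvGetD_set_ne _ _ _ _ _ (by omega),
                          pvGetD_set_self _ _ _ _ (by omega)]; simp [pvChl]⟩
              · have e : 2 ^ (i+1) - 1 + (2 * pos + 1) = 2 * (2 ^ i - 1 + pos) + 2 := by omega
                rw [e]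
                have e2 : 2 * pos + 1 - acc.length = 1 := by omega
                rw [e2]
                exact ⟨by rw [pvGetD_set_self _ _ _ _ (by simp [hl1]; omega)]; simp [pvChl],
                       by rw [pvGetD_set_self _ _ _ _ (by simp [hl2]; omega)]; simp [pvChl]⟩)
          (by -- everything beyond the two fresh children still default
            intro m hm
            rw [pvGetD_set_ne _ _ _ _ _ (by omega), pvGetD_set_ne _ _ _ _ _ (by omega),
              pvGetD_set_ne _ _ _ _ _ (by omega), pvGetD_set_ne _ _ _ _ _ (by omega)]
            exact hdef m (by omega))
          (by -- the guess list gains one entry at position out.length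
            rw [hgl, ← hout, pvSet_mid _ _ (by omega) _ _]
            have e : 2 ^ (K-1) - 1 - out.length - 1 = 2 ^ (K-1) - 1 - (out ++ [(pvSplitNode k nd.1 nd.2).1]).length := by
              simp; omega
            rw [e])
          (by simp [hout]; omega)
      refine ⟨wsl', ghl', ?_, hq1, hq2, ?_, ?_⟩
      · rw [hmain]
        have e : ((out ++ [(pvSplitNode k nd.1 nd.2).1]) ++ fs'.map (pvOut1 k))
            = out ++ (nd :: fs').map (pvOut1 k) := by
          simp [pvOut1, List.append_assoc]
        rw [e]
        have e2 : 2 ^ (K-1) - 1 - ((out ++ [(pvSplitNode k nd.1 nd.2).1]).length + fs'.length)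
            = 2 ^ (K-1) - 1 - (out.length + (nd :: fs').length) := by simp; omega
        rw [e2]
      · intro q hq
        have h := hchl q (by simp at hq ⊢; omega)
        simpa [List.append_assoc] using h
      · intro m hm
        exact hdf m (by simp at hm ⊢; omega)

theorem pvFoldA_levels (k : Int) (K : Nat) (hkK : k = (K : Int)) (n : Nat) :
    ∀ (i : Nat), n = K - 1 - i → i ≤ K - 1 → 1 ≤ K →
    ∀ (fr : List pvNode) (wsl : List (List String)) (ghl : List (List Char)) (gl : List String)
      (out : List String),
      wsl.length = 2 ^ K - 1 → ghl.length = 2 ^ K - 1 → gl.length = 2 ^ (K-1) - 1 →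
      fr.length = 2 ^ i →
      (∀ q, q < fr.length → wsl.getD (2 ^ i - 1 + q) [] = (fr.getD q ([], [])).1
          ∧ ghl.getD (2 ^ i - 1 + q) [] = (fr.getD q ([], [])).2) →
      (∀ m, 2 ^ (i+1) - 1 ≤ m → wsl.getD m [] = [] ∧ ghl.getD m [] = []) →
      gl = out ++ List.replicate (2 ^ (K-1) - 1 - out.length) "" →
      out.length = 2 ^ i - 1 →
      ((PySem.List.pyRange (i : Int) (k - 1) 1).foldl
          (fun st j =>
            (PySem.List.pyRange ((2:Int) ^ j.toNat - 1) ((2:Int) ^ (j.toNat + 1) - 1) 1).foldl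
              (pvBodyA k) st)
          (wsl, ghl, gl)).2.2 = out ++ pvAllOuts k n fr := by
  induction n with
  | zero =>
      intro i hn hi hK fr wsl ghl gl out hl1 hl2 hl3 hfl hfr hdef hgl hout
      have hieq : i = K - 1 := by omega
      rw [PySem.List.pyRange_one_eq_nil (by rw [hkK]; exact_mod_cast (by omega : (K:Int) - 1 ≤ (i:Int)))]
      subst hieq
      simp [pvAllOuts, hgl, hout]
  | succ n ihn =>
      intro i hn hi hK fr wsl ghl gl out hl1 hl2 hl3 hfl hfr hdef hgl hout
      have hiK : i + 2 ≤ K := by omega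
      have pow1 : (2:Nat)^(i+1) = 2 * 2^i := by rw [pow_succ]; ring
      have pow5 : (1:Nat) ≤ 2^i := Nat.one_le_two_pow
      have pow5' : (1:Nat) ≤ 2^(i+1) := Nat.one_le_two_pow
      rw [PySem.List.pyRange_one_cons (by rw [hkK]; exact_mod_cast (by omega : (i:Int) < (K:Int) - 1)),
        List.foldl_cons]
      have hc1 : (2:Int) ^ ((i:Int)).toNat - 1 = ((2 ^ i - 1 + 0 : Nat) : Int) := by
        rw [Int.toNat_natCast]; push_cast [Nat.cast_sub pow5]; ring
      have hc2 : (2:Int) ^ (((i:Int)).toNat + 1) - 1 = ((2 ^ (i+1) - 1 : Nat) : Int) := by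
        rw [Int.toNat_natCast]; push_cast [Nat.cast_sub pow5']; ring
      rw [hc1, hc2]
      obtain ⟨wsl', ghl', hmain, hq1, hq2, hchl, hdf⟩ :=
        pvFoldA_level k K i hiK fr 0 (by simp [hfl]) wsl ghl gl [] out
          hl1 hl2 hl3 (by simp)
          (by intro q hq; simpa using hfr q hq)
          (by intro r hr; omega)
          (by intro m hm; exact hdef m (by omega))
          hgl hout
      rw [hmain]
      have hres := ihn (i+1) (by omega) (by omega) hK (pvNext k fr) wsl' ghl'
        ((out ++ fr.map (pvOut1 k)) ++ List.replicate (2 ^ (K-1) - 1 - (out.length + fr.length)) "")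
        (out ++ fr.map (pvOut1 k))
        hq1 hq2
        (by have pow6 : (2:Nat)^(i+1) ≤ 2^(K-1) := Nat.pow_le_pow_right (by norm_num) (by omega)
            simp [hout, hfl]; omega)
        (by rw [pvNext_length, hfl, pow1])
        (by intro q hq
            rw [pvNext_length, hfl] at hq
            have h := hchl q (by omega)
            simpa [pvNext] using h)
        (by intro m hm
            exact hdf m (by omega))
        (by have e : out.length + fr.length = (out ++ fr.map (pvOut1 k)).length := by simp
            rw [e])
        (by have pow6 : (2:Nat)^(i+1) ≤ 2^(K-1) := Nat.pow_le_pow_right (by norm_num) (by omega)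
            simp [hout, hfl]; omega)
      have ecast : ((i:Int)) + 1 = ((i + 1 : Nat) : Int) := by push_cast; ring
      rw [ecast, hres, pvAllOuts]
      simp [List.append_assoc]

-- A's port computes exactly the level-order output list
theorem pvAEq (ws : List String) (k : Int) (hk : 1 ≤ k) :
    guess_tree ws k = pvAllOuts k (k.toNat - 1) [(ws, [])] := by
  have hK1 : 1 ≤ k.toNat := by omega
  have hkK : k = (k.toNat : Int) := by omega
  have pw : (2:Nat)^1 ≤ 2^k.toNat := Nat.pow_le_pow_right (by norm_num) hK1
  have h := pvFoldA_levels k k.toNat hkK (k.toNat - 1) 0 (by omega) (by omega) hK1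
    [(ws, [])]
    ((List.replicate (2 ^ k.toNat - 1) ([] : List String)).set 0 ws)
    ((List.replicate (2 ^ k.toNat - 1) ([] : List Char)).set 0 [])
    (List.replicate (2 ^ (k.toNat - 1) - 1) "") []
    (by simp) (by simp) (by simp) (by simp)
    (by intro q hq
        have hq0 : q = 0 := by simpa using hq
        subst hq0
        have h0 : (2:Nat)^0 - 1 + 0 = 0 := rfl
        rw [h0]
        constructor
        · rw [pvGetD_set_self _ 0 _ _ (by simp; omega)]; simp
        · rw [pvGetD_set_self _ 0 _ _ (by simp; omega)]; simp)
    (by intro m hm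
        have hm1 : (1:Nat) ≤ m := by simpa using hm
        constructor <;>
          rw [pvGetD_set_ne _ _ _ _ _ (by omega)] <;> exact pvGetD_replicate _ _ _)
    (by simp) (by simp)
  unfold guess_tree
  simp only [Nat.cast_zero, List.nil_append] at h
  simp only []
  rw [h]

-- ---------- direction-list arithmetic ----------

theorem pvVal_lt (bits : List Bool) : pvVal bits < 2 ^ bits.length := by
  induction bits with
  | nil => simp [pvVal]
  | cons b bs ih =>
      have h2 : (2:Nat) ^ (bs.length + 1) = 2 * 2 ^ bs.length := by rw [pow_succ]; ring
      cases b <;> simp [pvVal] <;> omega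

theorem pvVal_append (bs : List Bool) (b : Bool) :
    pvVal (bs ++ [b]) = 2 * pvVal bs + (if b then 1 else 0) := by
  induction bs with
  | nil => cases b <;> simp [pvVal]
  | cons c cs ih =>
      have h2 : (2:Nat) ^ (cs.length + 1) = 2 * 2 ^ cs.length := by rw [pow_succ]; ring
      cases c <;> simp [pvVal, ih, h2] <;> ring

theorem pvBits_length (d v : Nat) : (pvBits d v).length = d := by
  induction d generalizing v with
  | zero => simp [pvBits]
  | succ d ih => simp [pvBits, ih]

theorem pvBits_val (d : Nat) : ∀ v, v < 2 ^ d → pvVal (pvBits d v) = v := by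
  induction d with
  | zero => intro v hv; interval_cases v; simp [pvBits, pvVal]
  | succ d ih =>
      intro v hv
      have h2 : (2:Nat) ^ (d + 1) = 2 * 2 ^ d := by rw [pow_succ]; ring
      rw [pvBits, pvVal_append, ih (v / 2) (by omega)]
      rcases Nat.mod_two_eq_zero_or_one v with h | h <;> simp [h] <;> omega

theorem pvIdx_closed (bits : List Bool) : ∀ j, pvIdx j bits + 1 = (j + 1) * 2 ^ bits.length + pvVal bits := by
  induction bits with
  | nil => intro j; simp [pvIdx, pvVal]
  | cons b bs ih =>
      intro j
      rw [pvIdx, ih]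
      have h2 : (2:Nat) ^ (bs.length + 1) = 2 ^ bs.length * 2 := by rw [pow_succ]
      cases b <;> simp [pvVal, h2] <;> ring

theorem pvInSub_self (j D : Nat) : pvInSub j D j :=
  ⟨0, Nat.zero_le _, 0, by norm_num, by ring⟩

theorem pvInSub_lb {c D m : Nat} (h : pvInSub c D m) : c ≤ m := by
  obtain ⟨d, _, v, hv, he⟩ := h
  have h1 : (1:Nat) ≤ 2 ^ d := Nat.one_le_two_pow
  have h2 : (c + 1) * 1 ≤ (c + 1) * 2 ^ d := Nat.mul_le_mul_left _ h1
  omega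

theorem pvPowMulLe (j e1 e2 : Nat) (h : e1 ≤ e2) : (j + 1) * 2 ^ e1 ≤ (j + 1) * 2 ^ e2 :=
  Nat.mul_le_mul_left _ (Nat.pow_le_pow_right (by norm_num) h)

theorem pvAux (j e1 e2 v1 v2 : Nat) (h : e1 < e2) (hv1 : v1 < 2 ^ e1) :
    (j + 1) * 2 ^ e1 + v1 < (j + 1) * 2 ^ e2 + v2 := by
  have k1 : (2:Nat) ^ e1 ≤ (j + 1) * 2 ^ e1 := Nat.le_mul_of_pos_left _ (by omega)
  have k2 : (j + 1) * 2 ^ e1 + (j + 1) * 2 ^ e1 = (j + 1) * 2 ^ (e1 + 1) := by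
    rw [pow_succ]; ring
  have k3 : (j + 1) * 2 ^ (e1 + 1) ≤ (j + 1) * 2 ^ e2 := pvPowMulLe j (e1+1) e2 (by omega)
  omega

theorem pvUniq {j e1 v1 e2 v2 : Nat} (hv1 : v1 < 2 ^ e1) (hv2 : v2 < 2 ^ e2)
    (he : (j + 1) * 2 ^ e1 + v1 = (j + 1) * 2 ^ e2 + v2) : e1 = e2 ∧ v1 = v2 := by
  rcases Nat.lt_trichotomy e1 e2 with h | h | h
  · exact absurd he (Nat.ne_of_lt (pvAux j e1 e2 v1 v2 h hv1))
  · subst h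
    exact ⟨rfl, by omega⟩
  · exact absurd he.symm (Nat.ne_of_lt (pvAux j e2 e1 v2 v1 h hv2))

theorem pvDisjoint {j D1 D2 m : Nat} (h1 : pvInSub (2 * j + 1) D1 m)
    (h2 : pvInSub (2 * j + 2) D2 m) : False := by
  obtain ⟨d1, _, v1, hv1, he1⟩ := h1
  obtain ⟨d2, _, v2, hv2, he2⟩ := h2
  have e1 : (2 * j + 1 + 1) * 2 ^ d1 = (j + 1) * 2 ^ (d1 + 1) := by rw [pow_succ]; ring
  have e2 : (2 * j + 2 + 1) * 2 ^ d2 = (j + 1) * 2 ^ (d2 + 1) + 2 ^ d2 := by rw [pow_succ]; ring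
  have he : (j + 1) * 2 ^ (d1 + 1) + v1 = (j + 1) * 2 ^ (d2 + 1) + (2 ^ d2 + v2) := by omega
  have p1 : (2:Nat) ^ (d1 + 1) = 2 * 2 ^ d1 := by rw [pow_succ]; ring
  have p2 : (2:Nat) ^ (d2 + 1) = 2 * 2 ^ d2 := by rw [pow_succ]; ring
  obtain ⟨hd, hv⟩ := pvUniq (by omega) (by omega) he
  have : d1 = d2 := by omega
  subst this
  omega

theorem pvChildSubL {j D m : Nat} (h : pvInSub (2 * j + 1) D m) : pvInSub j (D + 1) m := by
  obtain ⟨d, hd, v, hv, he⟩ := h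
  refine ⟨d + 1, by omega, v, ?_, ?_⟩
  · have : (2:Nat) ^ (d + 1) = 2 * 2 ^ d := by rw [pow_succ]; ring
    omega
  · have : (2 * j + 1 + 1) * 2 ^ d = (j + 1) * 2 ^ (d + 1) := by rw [pow_succ]; ring
    omega

theorem pvChildSubR {j D m : Nat} (h : pvInSub (2 * j + 2) D m) : pvInSub j (D + 1) m := by
  obtain ⟨d, hd, v, hv, he⟩ := h
  refine ⟨d + 1, by omega, 2 ^ d + v, ?_, ?_⟩
  · have : (2:Nat) ^ (d + 1) = 2 * 2 ^ d := by rw [pow_succ]; ring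
    omega
  · have : (2 * j + 2 + 1) * 2 ^ d = (j + 1) * 2 ^ (d + 1) + 2 ^ d := by rw [pow_succ]; ring
    omega

theorem pvIdx_in (j D : Nat) (bits : List Bool) (h : bits.length ≤ D) :
    pvInSub j D (pvIdx j bits) :=
  ⟨bits.length, h, pvVal bits, pvVal_lt bits, pvIdx_closed bits j⟩

theorem pvSub_bound {D m : Nat} (h : pvInSub 0 D m) : m + 1 < 2 ^ (D + 1) := by
  obtain ⟨d, hd, v, hv, he⟩ := h
  have p1 : (2:Nat) ^ (d + 1) = 2 * 2 ^ d := by rw [pow_succ]; ring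
  have p2 : (2:Nat) ^ (d + 1) ≤ 2 ^ (D + 1) := Nat.pow_le_pow_right (by norm_num) (by omega)
  omega

-- ---------- dead subtrees produce "" everywhere ----------

theorem pvSplit_empty (k : Int) (sx : List String) (hs : List Char) (h : sx.isEmpty = true) :
    pvSplitNode k sx hs = ("", ([], []), ([], [])) := by
  simp [pvSplitNode, h]

theorem pvSplit_none (k : Int) (sx : List String) (hs : List Char) (h : sx.isEmpty = false)
    (hfu : pvFirstUsable (pvMostCommon (sx.flatMap String.toList) k) hs = none) :
    pvSplitNode k sx hs = ("", ([], []), ([], [])) := by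
  simp [pvSplitNode, h, hfu]

theorem pvSplit_some (k : Int) (sx : List String) (hs : List Char) (w1 : Char)
    (h : sx.isEmpty = false)
    (hfu : pvFirstUsable (pvMostCommon (sx.flatMap String.toList) k) hs = some w1) :
    pvSplitNode k sx hs =
      (String.ofList [w1],
       (sx.filter (fun w => PySem.Chars.isIn [w1] w.toList), hs ++ [w1]),
       (sx.filter (fun w => !PySem.Chars.isIn [w1] w.toList), hs ++ [w1])) := by
  simp [pvSplitNode, h, hfu]

theorem pvDescend_dead (k : Int) : ∀ (bits : List Bool),
    pvOut1 k (pvDescend k (([] : List String), ([] : List Char)) bits) = "" := by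
  intro bits
  induction bits with
  | nil => simp [pvDescend, pvOut1, pvSplit_empty]
  | cons b bs ih =>
      have hc : pvChild k b (([] : List String), ([] : List Char)) = ([], []) := by
        cases b <;> simp [pvChild, pvSplit_empty]
      rw [pvDescend, hc]
      exact ih

theorem pvDead_all (k : Int) (sx : List String) (hs : List Char)
    (h : pvSplitNode k sx hs = ("", ([], []), ([], []))) :
    ∀ bits, pvOut1 k (pvDescend k (sx, hs) bits) = "" := by
  intro bits
  cases bits with
  | nil => simp [pvDescend, pvOut1, h]
  | cons b bs =>
      have hc : pvChild k b (sx, hs) = ([], []) := by cases b <;> simp [pvChild, h]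
      rw [pvDescend, hc]
      exact pvDescend_dead k bs

-- ---------- BFS side: element at heap position of the level-order list ----------

theorem pvDescend_append (k : Int) (bs : List Bool) (b : Bool) : ∀ nd,
    pvDescend k nd (bs ++ [b]) = pvChild k b (pvDescend k nd bs) := by
  induction bs with
  | nil => intro nd; simp [pvDescend]
  | cons c cs ih => intro nd; rw [List.cons_append, pvDescend, pvDescend, ih]

theorem pvNext_cons (k : Int) (nd : pvNode) (t : List pvNode) :
    pvNext k (nd :: t) = pvChild k false nd :: pvChild k true nd :: pvNext k t := by
  simp [pvNext, pvChl, pvChild]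

theorem pvNext_getD (k : Int) : ∀ (fr : List pvNode) (r : Nat), r < 2 * fr.length →
    (pvNext k fr).getD r ([], []) = pvChild k (r % 2 == 1) ((fr.getD (r / 2) ([], []))) := by
  intro fr
  induction fr with
  | nil => intro r hr; simp at hr
  | cons nd t ih =>
      intro r hr
      rw [pvNext_cons]
      match r with
      | 0 => simp [List.getD]
      | 1 => simp [List.getD]
      | (r + 2) =>
          have e1 : (r + 2) % 2 = r % 2 := Nat.add_mod_right r 2
          have e2 : (r + 2) / 2 = r / 2 + 1 := Nat.add_div_right r (by norm_num)
          simp only [List.getD_cons_succ]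
          rw [ih r (by simp at hr; omega), e1, e2]
          simp [List.getD]

theorem pvIterLen (k : Int) : ∀ (d : Nat) (fr : List pvNode),
    ((pvNext k)^[d] fr).length = 2 ^ d * fr.length := by
  intro d
  induction d with
  | zero => intro fr; simp
  | succ d ih =>
      intro fr
      rw [Function.iterate_succ_apply', pvNext_length, ih, pow_succ]
      ring

theorem pvIterNext (k : Int) (nd : pvNode) : ∀ (d : Nat) (r : Nat), r < 2 ^ d →
    ((pvNext k)^[d] [nd]).getD r ([], []) = pvDescend k nd (pvBits d r) := by
  intro d
  induction d with
  | zero =>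
      intro r hr
      interval_cases r
      simp [pvBits, pvDescend, List.getD]
  | succ d ih =>
      intro r hr
      have hlen : ((pvNext k)^[d] [nd]).length = 2 ^ d := by rw [pvIterLen]; simp
      have h2 : (2:Nat) ^ (d + 1) = 2 * 2 ^ d := by rw [pow_succ]; ring
      rw [Function.iterate_succ_apply', pvNext_getD k _ r (by omega),
        ih (r / 2) (by omega), pvBits, ← pvDescend_append]

theorem pvAllOuts_length (k : Int) : ∀ (n : Nat) (fr : List pvNode),
    (pvAllOuts k n fr).length = (2 ^ n - 1) * fr.length := by
  intro n
  induction n with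
  | zero => intro fr; simp [pvAllOuts]
  | succ n ih =>
      intro fr
      obtain ⟨Q, hQ⟩ : ∃ Q, (2:Nat) ^ n = Q + 1 := ⟨2 ^ n - 1, by have := Nat.one_le_two_pow (n := n); omega⟩
      have h2 : (2:Nat) ^ (n + 1) = 2 * 2 ^ n := by rw [pow_succ]; ring
      rw [pvAllOuts]
      simp only [List.length_append, List.length_map, ih, pvNext_length]
      rw [h2, hQ]
      have eA : Q + 1 - 1 = Q := by omega
      have eB : 2 * (Q + 1) - 1 = 2 * Q + 1 := by omega
      rw [eA, eB]
      ring

theorem pvAllOuts_getD (k : Int) : ∀ (d n : Nat) (fr : List pvNode) (r : Nat), d < n →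
    r < fr.length * 2 ^ d →
    (pvAllOuts k n fr).getD (fr.length * (2 ^ d - 1) + r) "" =
      pvOut1 k (((pvNext k)^[d] fr).getD r ([], [])) := by
  intro d
  induction d with
  | zero =>
      intro n fr r hn hr
      match n with
      | n + 1 =>
          simp only [pow_zero, mul_one] at hr
          rw [pvAllOuts]
          simp only [pow_zero, Nat.sub_self, Nat.mul_zero, Nat.zero_add]
          rw [List.getD_append _ _ _ _ (by simpa using hr)]
          rw [List.getD_eq_getElem _ _ (by simpa using hr), List.getElem_map,
            Function.iterate_zero_apply, List.getD_eq_getElem _ _ hr]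
  | succ d ih =>
      intro n fr r hn hr
      match n with
      | n + 1 =>
          have hdn : d < n := by omega
          have h1 : (1:Nat) ≤ 2 ^ d := Nat.one_le_two_pow
          have h2 : (2:Nat) ^ (d + 1) = 2 * 2 ^ d := by rw [pow_succ]; ring
          have eidx : fr.length * (2 ^ (d+1) - 1) + r
              = fr.length + ((2 * fr.length) * (2 ^ d - 1) + r) := by
            have e1 : (2:Nat) ^ (d + 1) - 1 = 2 * (2 ^ d - 1) + 1 := by omega
            rw [e1]
            have e2 : fr.length * (2 * (2 ^ d - 1) + 1)
                = 2 * fr.length * (2 ^ d - 1) + fr.length := by ring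
            rw [e2]
            omega
          rw [pvAllOuts, eidx,
            List.getD_append_right _ _ _ _ (by simp)]
          simp only [List.length_map, Nat.add_sub_cancel_left]
          have := ih n (pvNext k fr) r hdn (by
            rw [pvNext_length]
            have e3 : 2 * fr.length * 2 ^ d = fr.length * 2 ^ (d + 1) := by rw [pow_succ]; ring
            omega)
          rw [pvNext_length] at this
          rw [this, ← Function.iterate_succ_apply]

-- ---------- DFS side: what pvBuildB writes where ----------

theorem pvBuildB_spec (k : Int) (fuel : Nat) : ∀ (level : Int) (j : Nat) (sx : List String)
    (hs : List Char) (gl : List String),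
    fuel = (k - 1 - level).toNat → level ≤ k - 2 →
    (pvBuildB k j sx hs level gl).length = gl.length
    ∧ (∀ m, ¬ pvInSub j (k - 2 - level).toNat m →
        (pvBuildB k j sx hs level gl).getD m "" = gl.getD m "")
    ∧ (∀ bits : List Bool, bits.length ≤ (k - 2 - level).toNat →
        (∀ m, pvInSub j (k - 2 - level).toNat m → m < gl.length ∧ gl.getD m "" = "") →
        (pvBuildB k j sx hs level gl).getD (pvIdx j bits) "" =
          pvOut1 k (pvDescend k (sx, hs) bits)) := by
  induction fuel with
  | zero => intro level j sx hs gl hf hlev; omega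
  | succ n ih =>
      intro level j sx hs gl hf hlev
      by_cases he : sx.isEmpty
      · have hstep : pvBuildB k j sx hs level gl = gl := by rw [pvBuildB, if_pos he]
        rw [hstep]
        refine ⟨rfl, fun m _ => rfl, fun bits hb hpre => ?_⟩
        rw [(hpre _ (pvIdx_in j _ bits hb)).2, pvDead_all k sx hs (pvSplit_empty k sx hs he)]
      · have he' : sx.isEmpty = false := by rwa [Bool.not_eq_true] at he
        cases hfu : pvFirstUsable (pvMostCommon (sx.flatMap String.toList) k) hs with
        | none =>
            have hstep : pvBuildB k j sx hs level gl = gl := by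
              rw [pvBuildB, if_neg he, hfu]
            rw [hstep]
            refine ⟨rfl, fun m _ => rfl, fun bits hb hpre => ?_⟩
            rw [(hpre _ (pvIdx_in j _ bits hb)).2, pvDead_all k sx hs (pvSplit_none k sx hs he' hfu)]
        | some w1 =>
            have hsp := pvSplit_some k sx hs w1 he' hfu
            have hstep : pvBuildB k j sx hs level gl =
                (if _h : level + 1 ≤ k - 2 then
                  pvBuildB k (2 * j + 2) (sx.filter (fun w => !PySem.Chars.isIn [w1] w.toList))
                    (hs ++ [w1]) (level + 1)
                    (pvBuildB k (2 * j + 1) (sx.filter (fun w => PySem.Chars.isIn [w1] w.toList))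
                      (hs ++ [w1]) (level + 1) (gl.set j (String.ofList [w1])))
                else gl.set j (String.ofList [w1])) := by
              rw [pvBuildB, if_neg he, hfu]
            rw [hstep]
            by_cases hrec : level + 1 ≤ k - 2
            · rw [dif_pos hrec]
              have hD1 : 1 ≤ (k - 2 - level).toNat := by omega
              have hD' : (k - 2 - (level + 1)).toNat = (k - 2 - level).toNat - 1 := by omega
              have hfn : n = (k - 1 - (level + 1)).toNat := by omega
              have IH1 := ih (level + 1) (2 * j + 1)
                (sx.filter (fun w => PySem.Chars.isIn [w1] w.toList)) (hs ++ [w1])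
                (gl.set j (String.ofList [w1])) hfn hrec
              set G1 := pvBuildB k (2 * j + 1)
                (sx.filter (fun w => PySem.Chars.isIn [w1] w.toList)) (hs ++ [w1]) (level + 1)
                (gl.set j (String.ofList [w1])) with hG1
              have IH2 := ih (level + 1) (2 * j + 2)
                (sx.filter (fun w => !PySem.Chars.isIn [w1] w.toList)) (hs ++ [w1]) G1 hfn hrec
              have hlen : (pvBuildB k (2 * j + 2)
                  (sx.filter (fun w => !PySem.Chars.isIn [w1] w.toList)) (hs ++ [w1]) (level + 1)
                  G1).length = gl.length := by
                rw [IH2.1, IH1.1, List.length_set]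
              refine ⟨hlen, ?_, ?_⟩
              · intro m hm
                have eD : (k - 2 - (level + 1)).toNat + 1 = (k - 2 - level).toNat := by omega
                have hm1 : ¬ pvInSub (2 * j + 1) (k - 2 - (level + 1)).toNat m := by
                  intro hc
                  exact hm (by have h2 := pvChildSubL hc; rwa [eD] at h2)
                have hm2 : ¬ pvInSub (2 * j + 2) (k - 2 - (level + 1)).toNat m := by
                  intro hc
                  exact hm (by have h2 := pvChildSubR hc; rwa [eD] at h2)
                have hmj : m ≠ j := fun hmj => hm (hmj ▸ pvInSub_self j _)
                rw [IH2.2.1 m hm2, IH1.2.1 m hm1, pvGetD_set_ne _ _ _ _ _ (Ne.symm hmj)]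
              · intro bits hb hpre
                have hjlt : j < gl.length := (hpre j (pvInSub_self j _)).1
                -- inside either child subtree the start list (after setting j) is still ""
                have eD : (k - 2 - (level + 1)).toNat + 1 = (k - 2 - level).toNat := by omega
                have hchpre : ∀ c, (c = 2 * j + 1 ∨ c = 2 * j + 2) →
                    ∀ m, pvInSub c (k - 2 - (level + 1)).toNat m →
                      m < (gl.set j (String.ofList [w1])).length ∧
                        (gl.set j (String.ofList [w1])).getD m "" = "" := by
                  intro c hc m hmc
                  have hsub : pvInSub j (k - 2 - level).toNat m := by
                    rcases hc with rfl | rfl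
                    · have h2 := pvChildSubL hmc; rwa [eD] at h2
                    · have h2 := pvChildSubR hmc; rwa [eD] at h2
                  have hmj : j ≠ m := by
                    have := pvInSub_lb hmc; omega
                  exact ⟨by rw [List.length_set]; exact (hpre m hsub).1,
                         by rw [pvGetD_set_ne _ _ _ _ _ hmj]; exact (hpre m hsub).2⟩
                cases bits with
                | nil =>
                    have hj2 : ¬ pvInSub (2 * j + 2) (k - 2 - (level + 1)).toNat j := by
                      intro hc; have := pvInSub_lb hc; omega
                    have hj1 : ¬ pvInSub (2 * j + 1) (k - 2 - (level + 1)).toNat j := by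
                      intro hc; have := pvInSub_lb hc; omega
                    rw [show pvIdx j [] = j from rfl, IH2.2.1 j hj2, IH1.2.1 j hj1,
                      pvGetD_set_self _ _ _ _ hjlt]
                    simp [pvDescend, pvOut1, hsp]
                | cons b bs =>
                    have hbs : bs.length ≤ (k - 2 - (level + 1)).toNat := by
                      simp at hb; omega
                    cases b with
                    | false =>
                        have hidx : pvIdx j (false :: bs) = pvIdx (2 * j + 1) bs := by
                          simp [pvIdx]
                        have hin1 : pvInSub (2 * j + 1) (k - 2 - (level + 1)).toNat
                            (pvIdx (2 * j + 1) bs) := pvIdx_in _ _ bs hbs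
                        have hn2 : ¬ pvInSub (2 * j + 2) (k - 2 - (level + 1)).toNat
                            (pvIdx (2 * j + 1) bs) := fun hc => pvDisjoint hin1 hc
                        rw [hidx, IH2.2.1 _ hn2,
                          IH1.2.2 bs hbs (hchpre _ (Or.inl rfl))]
                        rw [pvDescend]
                        have : pvChild k false (sx, hs)
                            = (sx.filter (fun w => PySem.Chars.isIn [w1] w.toList), hs ++ [w1]) := by
                          simp [pvChild, hsp]
                        rw [this]
                    | true =>
                        have hidx : pvIdx j (true :: bs) = pvIdx (2 * j + 2) bs := by
                          simp [pvIdx]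
                        have hpre2 : ∀ m, pvInSub (2 * j + 2) (k - 2 - (level + 1)).toNat m →
                            m < G1.length ∧ G1.getD m "" = "" := by
                          intro m hmc
                          have hn1 : ¬ pvInSub (2 * j + 1) (k - 2 - (level + 1)).toNat m :=
                            fun hc => pvDisjoint hc hmc
                          have base := hchpre _ (Or.inr rfl) m hmc
                          exact ⟨by rw [IH1.1]; exact base.1,
                                 by rw [IH1.2.1 m hn1]; exact base.2⟩
                        rw [hidx, IH2.2.2 bs hbs hpre2]
                        rw [pvDescend]
                        have : pvChild k true (sx, hs)
                            = (sx.filter (fun w => !PySem.Chars.isIn [w1] w.toList), hs ++ [w1]) := by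
                          simp [pvChild, hsp]
                        rw [this]
            · rw [dif_neg hrec]
              have hD0 : (k - 2 - level).toNat = 0 := by omega
              refine ⟨List.length_set .., ?_, ?_⟩
              · intro m hm
                have hmj : m ≠ j := fun hmj => hm (hmj ▸ pvInSub_self j _)
                rw [pvGetD_set_ne _ _ _ _ _ (Ne.symm hmj)]
              · intro bits hb hpre
                have hb0 : bits = [] := by
                  rw [hD0] at hb; exact List.eq_nil_of_length_eq_zero (by omega)
                subst hb0
                have hjlt : j < gl.length := (hpre j (pvInSub_self j _)).1
                rw [show pvIdx j [] = j from rfl, pvGetD_set_self _ _ _ _ hjlt]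
                simp [pvDescend, pvOut1, hsp]

-- ===== VERDICT =====
theorem guess_tree_spec : Claim_equal_guess_tree := by
  intro ws k hdom hpre
  have hk : (1:Int) ≤ k := hpre.1
  unfold Spec_guess_tree
  rw [pvAEq ws k hk]
  by_cases hk2 : 2 ≤ k
  · -- k ≥ 2: compare element by element at heap positions
    have hK2 : 2 ≤ k.toNat := by omega
    have hgl : (2:Nat) ^ (k - 1).toNat = 2 ^ (k.toNat - 1) := by
      congr 1; omega
    have hlevD : (k - 2 - 0).toNat = k.toNat - 2 := by omega
    have hone : (1:Nat) ≤ 2 ^ (k.toNat - 1) := Nat.one_le_two_pow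
    have hspec := pvBuildB_spec k (k - 1 - 0).toNat 0 0 ws []
      (List.replicate (2 ^ (k - 1).toNat - 1) "") rfl (by omega)
    have hpreB : ∀ m, pvInSub 0 (k - 2 - 0).toNat m →
        m < (List.replicate (2 ^ (k - 1).toNat - 1) ("" : String)).length ∧
          (List.replicate (2 ^ (k - 1).toNat - 1) ("" : String)).getD m "" = "" := by
      intro m hm
      have hb := pvSub_bound hm
      rw [hlevD] at hb
      have he : k.toNat - 2 + 1 = k.toNat - 1 := by omega
      rw [he] at hb
      exact ⟨by simp [hgl]; omega, pvGetD_replicate _ _ _⟩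
    have hlenB : (guess_tree_alt ws k).length = 2 ^ (k.toNat - 1) - 1 := by
      unfold guess_tree_alt
      simp only [if_pos hk2]
      rw [hspec.1]
      simp [hgl]
    have hlenA : (pvAllOuts k (k.toNat - 1) [(ws, ([] : List Char))]).length
        = 2 ^ (k.toNat - 1) - 1 := by
      rw [pvAllOuts_length]; simp
    apply List.ext_getElem (by omega)
    intro m hm1 hm2
    have hmB : m < 2 ^ (k.toNat - 1) - 1 := hlenA ▸ hm1
    -- decompose m: level d, offset v
    have hm0 : m + 1 ≠ 0 := by omega
    set d := Nat.log2 (m + 1) with hd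
    have hd1 : 2 ^ d ≤ m + 1 := Nat.log2_self_le hm0
    have hd2 : m + 1 < 2 ^ (d + 1) := Nat.lt_log2_self
    have h2d : (2:Nat) ^ (d + 1) = 2 * 2 ^ d := by rw [pow_succ]; ring
    set v := m + 1 - 2 ^ d with hv
    have hvlt : v < 2 ^ d := by omega
    have hdK : d ≤ k.toNat - 2 := by
      by_contra hcon
      have : (2:Nat) ^ (k.toNat - 1) ≤ 2 ^ d := Nat.pow_le_pow_right (by norm_num) (by omega)
      omega
    -- A side
    have hA : (pvAllOuts k (k.toNat - 1) [(ws, ([] : List Char))]).getD m ""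
        = pvOut1 k (pvDescend k (ws, []) (pvBits d v)) := by
      have := pvAllOuts_getD k d (k.toNat - 1) [(ws, ([] : List Char))] v (by omega)
        (by simp; omega)
      simp only [List.length_cons, List.length_nil, Nat.one_mul, Nat.mul_comm] at this
      have em : 1 * (2 ^ d - 1) + v = m := by omega
      rw [em] at this
      rw [this, pvIterNext k _ d v hvlt]
    -- B side
    have hB : (guess_tree_alt ws k).getD m ""
        = pvOut1 k (pvDescend k (ws, []) (pvBits d v)) := by
      unfold guess_tree_alt
      simp only [if_pos hk2]
      have hidx : pvIdx 0 (pvBits d v) = m := by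
        have := pvIdx_closed (pvBits d v) 0
        rw [pvBits_length, pvBits_val d v hvlt] at this
        omega
      have := hspec.2.2 (pvBits d v) (by rw [pvBits_length, hlevD]; omega) hpreB
      rw [hidx] at this
      exact this
    have hgA := (List.getD_eq_getElem _ "" hm1 :
      (pvAllOuts k (k.toNat - 1) [(ws, ([] : List Char))]).getD m "" = _)
    have hgB := (List.getD_eq_getElem _ "" hm2 : (guess_tree_alt ws k).getD m "" = _)
    rw [← hgA, ← hgB, hA, hB]
  · -- k = 1: both sides are []
    have hk1 : k = 1 := by omega
    subst hk1
    have hA : pvAllOuts 1 ((1:Int).toNat - 1) [(ws, ([] : List Char))] = [] := by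
      simp [pvAllOuts]
    rw [hA]
    unfold guess_tree_alt
    norm_num
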